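-- pv_equiv track=rewrite | github.com/XingyanLiu/CAME | came/utils/preprocess.py | make_dict_from_str
-- ===== SOURCE A (Python) =====
-- def make_dict_from_str(s: str, n2id=True, ) -> dict:
--     s = s.split()
--     if not n2id:
--         s = s[::-1]
--     dct = {}
--     for k, v in zip(s[1::2], s[::2]):
--         if k in dct.keys():
--             dct[k] += f',{v}'
--         else:
--             dct[k] = v
--     return dct
-- ===== SOURCE B (Python) =====
-- def make_dict_from_str(s: str, n2id=True, ) -> dict:
--     toks = s.split()
--     if not n2id:
--         toks = toks[::-1]
--     # pair each even-index value with the following key token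
--     pairs = [(toks[i + 1], toks[i]) for i in range(0, len(toks) - 1, 2)]
--     # distinct keys in first-appearance order
--     keys = []
--     for k, _ in pairs:
--         if k not in keys:
--             keys.append(k)
--     # for each key, gather all its values by a scan over the pair list and join
--     return {k: ','.join(v for kk, v in pairs if kk == k) for k in keys}
-- ===== Notes on version B (the rewrite author's own statement) =====
-- stated objective: alternative
-- what changed: A builds the dict in a single pass, branching per pair and concatenating a comma-prefixed value onto the existing entry; B instead builds the explicit pair list, collects the distinct keys in first-appearance order, and then for each key gathers all of its values by a separate scan over the pair list and joins them once.
import Mathlib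
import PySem

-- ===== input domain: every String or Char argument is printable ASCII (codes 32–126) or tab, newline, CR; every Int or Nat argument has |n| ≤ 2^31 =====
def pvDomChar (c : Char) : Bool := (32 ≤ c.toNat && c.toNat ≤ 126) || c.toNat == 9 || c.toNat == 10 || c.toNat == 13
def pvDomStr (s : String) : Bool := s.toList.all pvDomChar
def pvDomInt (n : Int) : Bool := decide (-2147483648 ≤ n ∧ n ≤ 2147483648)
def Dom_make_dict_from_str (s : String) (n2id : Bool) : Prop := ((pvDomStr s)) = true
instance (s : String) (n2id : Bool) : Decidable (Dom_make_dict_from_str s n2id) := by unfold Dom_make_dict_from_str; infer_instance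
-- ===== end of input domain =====

-- B replaces A's single accumulating dict loop by staged passes: build the pair list, collect the
-- distinct keys, then gather each key's values by a scan over the pairs and join them (alternative).

-- ===== PORT A =====
def make_dict_from_str (s : String) (n2id : Bool) : List (String × String) :=
  let toks0 := PySem.Str.split₀ s
  let toks := if !n2id then (PySem.List.slice? toks0 none none (-1)).getD [] else toks0
  let pairs := List.zip ((PySem.List.slice? toks (some 1) none 2).getD [])
                        ((PySem.List.slice? toks none none 2).getD [])
  (pairs.foldl (fun d p =>
      if d.contains p.1 then d.insert p.1 (d.getD p.1 "" ++ ("," ++ p.2))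
      else d.insert p.1 p.2) PySem.Dict.empty).items

-- ===== PORT B =====
-- toks is only indexed at i and i+1 for i from range(0, len(toks)-1, 2), all in range,
-- so pyGetD's default "" is never used and the port is exact.
def make_dict_from_str_alt (s : String) (n2id : Bool) : List (String × String) :=
  let toks0 := PySem.Str.split₀ s
  let toks := if !n2id then (PySem.List.slice? toks0 none none (-1)).getD [] else toks0
  let pairs := (PySem.List.pyRange 0 ((toks.length : Int) - 1) 2).map
      (fun i => (PySem.List.pyGetD toks (i + 1) "", PySem.List.pyGetD toks i ""))
  let keys := pairs.foldl (fun ks p => if p.1 ∈ ks then ks else ks ++ [p.1]) []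
  keys.map (fun k =>
    (k, PySem.Str.join "," ((pairs.filter (fun p => p.1 == k)).map Prod.snd)))

-- ===== PRECONDITION & SPEC =====
def Spec_make_dict_from_str (s : String) (n2id : Bool) (out : List (String × String)) : Prop := out = make_dict_from_str_alt s n2id
instance (s : String) (n2id : Bool) (out : List (String × String)) : Decidable (Spec_make_dict_from_str s n2id out) := by unfold Spec_make_dict_from_str; infer_instance

-- ===== CLAIM (what is proved, stated in full; the proofs are below) =====
def Claim_equal_make_dict_from_str : Prop := ∀ (s : String) (n2id : Bool), Dom_make_dict_from_str s n2id → Spec_make_dict_from_str s n2id (make_dict_from_str s n2id)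

-- ===== LEMMAS AND PROOFS =====

def everyOther {α : Type} : List α → List α
  | [] => []
  | [a] => [a]
  | a :: _ :: t => a :: everyOther t

theorem everyOther_cons {α : Type} (x : α) (t : List α) :
    everyOther (x :: t) = x :: everyOther t.tail := by
  cases t <;> simp [everyOther]

theorem fmEven {α : Type} : ∀ (xs : List α),
    List.filterMap (fun k => xs[2 * k]?) (List.range ((xs.length + 1) / 2)) = everyOther xs := by
  intro xs
  induction xs using everyOther.induct with
  | case1 => simp [everyOther]
  | case2 a => simp [everyOther]
  | case3 a b t ih =>
    have hlen : (a :: b :: t).length = t.length + 2 := by simp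
    have hc : ((a :: b :: t).length + 1) / 2 = (t.length + 1) / 2 + 1 := by simp; omega
    rw [hc, List.range_succ_eq_map, List.filterMap_cons]
    simp only [List.getElem?_cons_zero, Nat.mul_zero]
    rw [List.filterMap_map]
    have hf : ∀ k ∈ List.range ((t.length + 1) / 2),
        ((fun k => (a :: b :: t)[2 * k]?) ∘ Nat.succ) k = t[2 * k]? := by
      intro k _
      have : 2 * Nat.succ k = 2 * k + 1 + 1 := by omega
      simp [this, List.getElem?_cons_succ]
    rw [List.filterMap_congr hf, ih, everyOther]

theorem sliceEven {α : Type} (xs : List α) :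
    (PySem.List.slice? xs none none 2).getD [] = everyOther xs := by
  rw [PySem.List.slice?]
  norm_num [PySem.List.sliceIndices]
  have hc : (if 0 < xs.length then (((xs.length:Int) + 2 - 1) / 2).toNat else 0)
      = (xs.length + 1) / 2 := by split <;> omega
  rw [hc]
  have hf : ∀ k ∈ List.range ((xs.length + 1) / 2),
      xs[(2 * (k:Int)).toNat]? = xs[2 * k]? := by
    intro k _
    have h2 : ((2:Int) * k).toNat = 2 * k := by omega
    rw [h2]
  rw [List.filterMap_congr hf, fmEven (xs := xs)]

theorem sliceOdd {α : Type} (xs : List α) :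
    (PySem.List.slice? xs (some 1) none 2).getD [] = everyOther xs.tail := by
  cases xs with
  | nil => rfl
  | cons a t =>
    rw [PySem.List.slice?]
    norm_num [PySem.List.sliceIndices]
    have hc : (if 0 < t.length then (((t.length:Int) + 2 - 1) / 2).toNat else 0)
        = (t.length + 1) / 2 := by split <;> omega
    rw [hc]
    have hf : ∀ k ∈ List.range ((t.length + 1) / 2),
        (a :: t)[((1:Int) + 2 * (k:Int)).toNat]? = t[2 * k]? := by
      intro k _
      have h2 : ((1:Int) + 2 * k).toNat = 2 * k + 1 := by omega
      rw [h2, List.getElem?_cons_succ]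
    rw [List.filterMap_congr hf, fmEven (xs := t)]

def pvPairup : List String → List (String × String)
  | [] => []
  | [_] => []
  | v :: k :: t => (k, v) :: pvPairup t

theorem zip_everyOther : ∀ (xs : List String),
    List.zip (everyOther xs.tail) (everyOther xs) = pvPairup xs := by
  intro xs
  induction xs using pvPairup.induct with
  | case1 => rfl
  | case2 a => rfl
  | case3 v k t ih =>
    rw [pvPairup]
    have h1 : (v :: k :: t).tail = k :: t := rfl
    rw [h1, everyOther_cons, everyOther_cons]
    simp only [List.tail_cons, List.zip_cons_cons]
    rw [← ih]

theorem pyGetD_cons_cons_add_two {α : Type} (a b : α) (t : List α) (i : Int) (d : α)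
    (h : 0 ≤ i) : PySem.List.pyGetD (a :: b :: t) (i + 2) d = PySem.List.pyGetD t i d := by
  rw [PySem.List.pyGetD_of_nonneg _ _ (by omega), PySem.List.pyGetD_of_nonneg _ _ h]
  have h2 : (i + 2).toNat = i.toNat + 1 + 1 := by omega
  rw [h2, List.getD_cons_succ, List.getD_cons_succ]

theorem pairup_eq_map : ∀ (xs : List String),
    (List.range (xs.length / 2)).map
        (fun (k : Nat) => (PySem.List.pyGetD xs (2 * (k:Int) + 1) "", PySem.List.pyGetD xs (2 * (k:Int)) ""))
      = pvPairup xs := by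
  intro xs
  induction xs using pvPairup.induct with
  | case1 => rfl
  | case2 a => simp [pvPairup]
  | case3 v k t ih =>
    have hc : (v :: k :: t).length / 2 = t.length / 2 + 1 := by
      simp only [List.length_cons]; omega
    rw [hc, List.range_succ_eq_map, pvPairup, List.map_cons, List.map_map]
    congr 1
    · simp [PySem.List.pyGetD_of_nonneg, List.getD]
    · rw [← ih]
      apply List.map_congr_left
      intro j _
      simp only [Function.comp]
      rw [show (2 * ((Nat.succ j : Nat) : Int) + 1) = ((2 * j + 3 : Nat) : Int) by push_cast; ring,
          show (2 * ((Nat.succ j : Nat) : Int)) = ((2 * j + 2 : Nat) : Int) by push_cast; ring,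
          show ((2 * j + 3 : Nat) : Int) = (2 * (j:Int) + 1) + 2 by push_cast; ring,
          show ((2 * j + 2 : Nat) : Int) = (2 * (j:Int)) + 2 by push_cast; ring]
      exact Prod.ext (pyGetD_cons_cons_add_two _ _ _ _ _ (by positivity))
                     (pyGetD_cons_cons_add_two _ _ _ _ _ (by positivity))

theorem rangeMap (toks : List String) :
    (PySem.List.pyRange 0 ((toks.length:Int) - 1) 2).map
        (fun i => (PySem.List.pyGetD toks (i + 1) "", PySem.List.pyGetD toks i ""))
      = pvPairup toks := by
  rw [PySem.List.pyRange_of_pos _ _ (by norm_num), ← pairup_eq_map toks, List.map_map]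
  have hc : (if (0:Int) < (toks.length:Int) - 1 then (((toks.length:Int) - 1 - 0 + 2 - 1) / 2).toNat else 0)
      = toks.length / 2 := by split <;> omega
  rw [hc]
  apply List.map_congr_left
  intro j _
  simp only [Function.comp]
  have h1 : (0:Int) + 2 * (j:Int) + 1 = 2 * (j:Int) + 1 := by ring
  have h2 : (0:Int) + 2 * (j:Int) = 2 * (j:Int) := by ring
  rw [h1, h2]

-- values of key k in the pair list, in order
def pvVals (l : List (String × String)) (k : String) : List String :=
  (l.filter (fun p => p.1 == k)).map Prod.snd

-- the string A's branch appends for each further value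
def pvCat : List String → String
  | [] => ""
  | v :: r => ("," ++ v) ++ pvCat r

-- first-appearance-order keys of l not yet in seen
def pvNew : List (String × String) → List String → List String
  | [], _ => []
  | p :: r, seen => if p.1 ∈ seen then pvNew r seen else p.1 :: pvNew r (seen ++ [p.1])

theorem keysFold : ∀ (l : List (String × String)) (ks : List String),
    l.foldl (fun ks p => if p.1 ∈ ks then ks else ks ++ [p.1]) ks = ks ++ pvNew l ks := by
  intro l
  induction l with
  | nil => intro ks; simp [pvNew]
  | cons p r ih =>
    intro ks
    rw [List.foldl_cons, pvNew]
    by_cases h : p.1 ∈ ks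
    · simp [h, ih]
    · simp only [h, if_false, ih (ks ++ [p.1])]
      simp

theorem pvNew_not_mem : ∀ (l : List (String × String)) (seen : List String) (k : String),
    k ∈ pvNew l seen → k ∉ seen := by
  intro l
  induction l with
  | nil => intro seen k h; simp [pvNew] at h
  | cons p r ih =>
    intro seen k h
    rw [pvNew] at h
    by_cases hp : p.1 ∈ seen
    · rw [if_pos hp] at h; exact ih seen k h
    · rw [if_neg hp] at h
      rcases List.mem_cons.mp h with rfl | h2
      · exact hp
      · intro hk; exact ih _ _ h2 (List.mem_append_left _ hk)

theorem join_cons (v : String) (vs : List String) :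
    PySem.Str.join "," (v :: vs) = v ++ pvCat vs := by
  induction vs generalizing v with
  | nil => simp [pvCat, PySem.Str.join, PySem.Chars.join_singleton]
  | cons w r ih =>
    apply String.toList_inj.mp
    have hw := ih w
    apply_fun String.toList at hw
    simp [PySem.Str.join, PySem.Chars.join_cons_cons, pvCat] at hw ⊢
    simp [← hw]

theorem pvMain : ∀ (l : List (String × String)) (e : PySem.Dict String String), e.keys.Nodup →
    l.foldl (fun d p =>
        if d.contains p.1 then d.insert p.1 (d.getD p.1 "" ++ ("," ++ p.2))
        else d.insert p.1 p.2) e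
      = PySem.Dict.mk (e.items.map (fun p => (p.1, p.2 ++ pvCat (pvVals l p.1)))
          ++ (pvNew l e.keys).map (fun k => (k, PySem.Str.join "," (pvVals l k)))) := by
  intro l
  induction l with
  | nil =>
    intro e _
    simp only [List.foldl_nil, pvNew, pvVals, List.filter_nil, List.map_nil, pvCat,
      List.append_nil]
    have : e.items.map (fun p => (p.1, p.2 ++ "")) = e.items.map id :=
      List.map_congr_left (by intro p _; simp)
    rw [this, List.map_id]
  | cons kv r ih =>
    intro e hnd
    obtain ⟨k, v⟩ := kv
    rw [List.foldl_cons]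
    by_cases h : e.contains k = true
    · have hkmem : k ∈ e.keys := (PySem.Dict.contains_iff_mem_keys _ _).mp h
      simp only [h, if_true]
      set e' := e.insert k (e.getD k "" ++ ("," ++ v)) with he'
      have hkeys : e'.keys = e.keys := PySem.Dict.keys_insert_of_contains _ _ h
      have hnd' : e'.keys.Nodup := by rw [hkeys]; exact hnd
      rw [ih e' hnd', hkeys]
      have hnew : pvNew ((k, v) :: r) e.keys = pvNew r e.keys := by
        rw [pvNew, if_pos hkmem]
      rw [hnew]
      congr 1
      congr 1
      · -- items part
        rw [he', PySem.Dict.items_insert_of_contains _ _ h, List.map_map]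
        apply List.map_congr_left
        intro p hp
        simp only [Function.comp]
        by_cases hpk : p.1 = k
        · have hbeq : (p.1 == k) = true := beq_iff_eq.mpr hpk
          have hget : e.getD k "" = p.2 := by
            apply PySem.Dict.getD_of_mem_items
            · rw [← hpk]; exact (by simpa using hp)
            · exact hnd
          simp only [hbeq, if_true, hget]
          have hv : pvVals ((k, v) :: r) p.1 = v :: pvVals r k := by
            simp [pvVals, hpk]
          rw [hv, pvCat, hpk]
          simp [String.append_assoc]
        · have hbeq : (p.1 == k) = false := beq_eq_false_iff_ne.mpr hpk
          have hkp : (k == p.1) = false := beq_eq_false_iff_ne.mpr (Ne.symm hpk)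
          simp only [hbeq, Bool.false_eq_true, if_false]
          have hv : pvVals ((k, v) :: r) p.1 = pvVals r p.1 := by
            simp [pvVals, hkp]
          rw [hv]
      · -- new keys part
        apply List.map_congr_left
        intro k' hk'
        have hne : k' ≠ k := fun hkk => pvNew_not_mem r e.keys k' hk' (hkk ▸ hkmem)
        have : (k == k') = false := by simpa using fun hkk => hne hkk.symm
        simp [pvVals, this]
    · have hkmem : k ∉ e.keys := fun hm => h ((PySem.Dict.contains_iff_mem_keys _ _).mpr hm)
      rw [if_neg h]
      set e' := e.insert k v with he'
      have hkeys : e'.keys = e.keys ++ [k] :=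
        PySem.Dict.keys_insert_of_not_contains _ _ (by simpa using h)
      have hnd' : e'.keys.Nodup := PySem.Dict.nodup_keys_insert _ _ _ hnd
      rw [ih e' hnd', hkeys]
      have hitems : e'.items = e.items ++ [(k, v)] :=
        PySem.Dict.items_insert_of_not_contains _ _ (by simpa using h)
      rw [hitems, List.map_append]
      have hnew : pvNew ((k, v) :: r) e.keys = k :: pvNew r (e.keys ++ [k]) := by
        rw [pvNew, if_neg hkmem]
      rw [hnew, List.map_cons]
      congr 1
      rw [List.append_assoc]
      congr 1
      · -- old items: key ≠ k, same values
        apply List.map_congr_left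
        intro p hp
        have hpk : p.1 ≠ k := fun he => hkmem (he ▸ PySem.Dict.mem_keys_of_mem_items _ hp)
        have : (k == p.1) = false := by simpa using fun hkk => hpk hkk.symm
        simp [pvVals, this]
      · simp only [List.map_nil, List.cons_append, List.nil_append, List.map_cons]
        congr 1
        · -- the new head entry
          show (k, v ++ pvCat (pvVals r k)) = (k, PySem.Str.join "," (pvVals ((k, v) :: r) k))
          rw [show pvVals ((k, v) :: r) k = v :: pvVals r k from by simp [pvVals], join_cons]
        · -- the remaining new keys
          apply List.map_congr_left
          intro k' hk'
          have hne : k' ≠ k := fun hkk =>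
            pvNew_not_mem r (e.keys ++ [k]) k' hk' (hkk ▸ List.mem_append_right _ (by simp))
          have : (k == k') = false := by simpa using fun hkk => hne hkk.symm
          simp [pvVals, this]

theorem pvPortsAgree (s : String) (n2id : Bool) :
    make_dict_from_str s n2id = make_dict_from_str_alt s n2id := by
  simp only [make_dict_from_str, make_dict_from_str_alt]
  set toks := (if !n2id then (PySem.List.slice? (PySem.Str.split₀ s) none none (-1)).getD []
               else PySem.Str.split₀ s) with htoks
  rw [sliceOdd, sliceEven, zip_everyOther, rangeMap,
      pvMain (pvPairup toks) PySem.Dict.empty (by simp),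
      keysFold]
  simp [PySem.Dict.empty, pvVals]

-- ===== VERDICT (by name: the statement is the Claim_ definition above) =====
theorem make_dict_from_str_spec : Claim_equal_make_dict_from_str := by
  intro s n2id _
  unfold Spec_make_dict_from_str
  exact pvPortsAgree s n2id
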